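-- pv_equiv track=rewrite | github.com/MrBrantCode/unitest_baseline | mut_generate/mist_train_taco/taco_7720/solution.py | count_valid_triples
-- ===== SOURCE A (Python) =====
-- def count_valid_triples(N, K):
--     cnt1 = 0
--     cnt2 = 0
--
--     if K % 2 == 1:
--         for i in range(1, N + 1):
--             if i % K == 0:
--                 cnt1 += 1
--         return cnt1 ** 3
--     else:
--         for i in range(1, N + 1):
--             if i % K == K // 2:
--                 cnt2 += 1
--             if i % K == 0:
--                 cnt1 += 1
--         return cnt1 ** 3 + cnt2 ** 3
-- ===== SOURCE B (Python) =====
-- def count_valid_triples(N, K):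
--     # closed-form counting: no loop over 1..N
--     if K == 0 or N < 1:
--         return 0
--     m = abs(K)
--     cnt1 = N // m
--     if K % 2 == 1:
--         return cnt1 ** 3
--     h = m // 2
--     cnt2 = (N - h) // m + 1 if N >= h else 0
--     return cnt1 ** 3 + cnt2 ** 3
-- ===== Notes on version B (the rewrite author's own statement) =====
-- stated objective: faster
-- what changed: Replaces the O(N) loop counting residues with closed-form floor-division formulas for both counts.
-- crash fix: A raises ZeroDivisionError when K = 0 and N >= 1 (i % 0 in the loop); B returns 0 there. — e.g. on count_valid_triples(5, 0): A raises ZeroDivisionError, B returns 0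
import Mathlib
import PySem

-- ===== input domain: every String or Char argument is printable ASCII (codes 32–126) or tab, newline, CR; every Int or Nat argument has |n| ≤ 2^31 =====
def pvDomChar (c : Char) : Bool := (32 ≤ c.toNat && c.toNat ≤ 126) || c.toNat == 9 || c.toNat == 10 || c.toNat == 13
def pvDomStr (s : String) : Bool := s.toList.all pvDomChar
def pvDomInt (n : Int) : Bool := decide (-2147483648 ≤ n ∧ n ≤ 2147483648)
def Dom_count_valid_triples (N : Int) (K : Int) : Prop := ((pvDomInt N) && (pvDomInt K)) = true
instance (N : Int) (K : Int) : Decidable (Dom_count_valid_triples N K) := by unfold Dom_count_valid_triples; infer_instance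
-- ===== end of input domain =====

-- B replaces A's loop over 1..N by closed-form floor-division counts (asymptotically faster).

-- ===== PORT A =====
def count_valid_triples (N : Int) (K : Int) : Int :=
  let cnt1 : Int := 0
  let cnt2 : Int := 0
  if PySem.Int.mod K 2 = 1 then
    let cnt1 := (PySem.List.pyRange 1 (N + 1) 1).foldl
      (fun c i => if PySem.Int.mod i K = 0 then c + 1 else c) cnt1
    cnt1 ^ 3
  else
    let s := (PySem.List.pyRange 1 (N + 1) 1).foldl
      (fun (s : Int × Int) i =>
        let s := if PySem.Int.mod i K = PySem.Int.floordiv K 2 then (s.1, s.2 + 1) else s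
        if PySem.Int.mod i K = 0 then (s.1 + 1, s.2) else s) (cnt1, cnt2)
    s.1 ^ 3 + s.2 ^ 3

-- ===== PORT B =====
def count_valid_triples_alt (N : Int) (K : Int) : Int :=
  if K = 0 ∨ N < 1 then 0
  else
    let m := |K|
    let cnt1 := PySem.Int.floordiv N m
    if PySem.Int.mod K 2 = 1 then cnt1 ^ 3
    else
      let h := PySem.Int.floordiv m 2
      let cnt2 := if N ≥ h then PySem.Int.floordiv (N - h) m + 1 else 0
      cnt1 ^ 3 + cnt2 ^ 3

-- ===== PRECONDITION & SPEC =====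
-- Pre_ excludes exactly the inputs where A raises ZeroDivisionError (i % 0 inside the loop): K = 0 with N ≥ 1.
def Pre_count_valid_triples (N : Int) (K : Int) : Prop := ¬ (K = 0 ∧ 1 ≤ N)
instance (N : Int) (K : Int) : Decidable (Pre_count_valid_triples N K) := by unfold Pre_count_valid_triples; infer_instance
def pvWitness_count_valid_triples : Int × Int := (10, 4)

-- A raises ZeroDivisionError when K = 0 and N ≥ 1 (i % 0 in the loop); B returns 0 there.
def Raises_count_valid_triples (N : Int) (K : Int) : Prop := K = 0 ∧ 1 ≤ N
instance (N : Int) (K : Int) : Decidable (Raises_count_valid_triples N K) := by unfold Raises_count_valid_triples; infer_instance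
def pvRaiseWitness_count_valid_triples : Int × Int := (5, 0)
def pvRaiseWitnessOut_count_valid_triples : Int := 0

def Spec_count_valid_triples (N : Int) (K : Int) (out : Int) : Prop := out = count_valid_triples_alt N K
instance (N : Int) (K : Int) (out : Int) : Decidable (Spec_count_valid_triples N K out) := by unfold Spec_count_valid_triples; infer_instance

-- ===== CLAIM (what is proved, stated in full; the proofs are below) =====
def Claim_equal_count_valid_triples : Prop := ∀ (N : Int) (K : Int), Dom_count_valid_triples N K → Pre_count_valid_triples N K → Spec_count_valid_triples N K (count_valid_triples N K)
def Claim_raises_count_valid_triples : Prop := (∀ (N : Int) (K : Int), Dom_count_valid_triples N K → Raises_count_valid_triples N K → ¬ Pre_count_valid_triples N K) ∧ (Dom_count_valid_triples (pvRaiseWitness_count_valid_triples.1) (pvRaiseWitness_count_valid_triples.2) ∧ Raises_count_valid_triples (pvRaiseWitness_count_valid_triples.1) (pvRaiseWitness_count_valid_triples.2) ∧ count_valid_triples_alt (pvRaiseWitness_count_valid_triples.1) (pvRaiseWitness_count_valid_triples.2) = pvRaiseWitnessOut_count_valid_triples)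

-- ===== LEMMAS AND PROOFS =====

-- an integer multiple of m lying in (-m, 2m) is 0 or m
lemma pv_dvd_cases (m x : Int) (hm : 0 < m) (hd : m ∣ x) (h1 : -m < x) (h2 : x < 2 * m) :
    x = 0 ∨ x = m := by
  obtain ⟨c, hc⟩ := hd
  have h0 : 0 ≤ c := by
    by_contra hneg
    have : m * c ≤ m * (-1) := mul_le_mul_of_nonneg_left (by omega) hm.le
    rw [mul_neg_one] at this
    omega
  have h1c : c ≤ 1 := by
    by_contra hgt
    have : m * 2 ≤ m * c := mul_le_mul_of_nonneg_left (by omega) hm.le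
    omega
  interval_cases c
  · left; omega
  · right; omega

-- Python i % K == K // 2 (K even) is the same test as i % |K| == |K| // 2
lemma pv_half (K i : Int) (hK : K ≠ 0) (h2 : 2 ∣ K) :
    (PySem.Int.mod i K = PySem.Int.floordiv K 2) ↔
      (PySem.Int.mod i |K| = PySem.Int.floordiv |K| 2) := by
  obtain ⟨t, ht⟩ := h2
  have hfd : PySem.Int.floordiv K 2 = t := by
    rw [PySem.Int.floordiv_eq_ediv_of_pos (by norm_num), ht, Int.mul_ediv_cancel_left _ (by norm_num)]
  rcases lt_trichotomy K 0 with hneg | hz | hpos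
  · have habs : |K| = -K := abs_of_neg hneg
    have hfd2 : PySem.Int.floordiv |K| 2 = -t := by
      rw [habs, PySem.Int.floordiv_eq_ediv_of_pos (by norm_num), ht]
      rw [show -(2 * t) = 2 * (-t) by ring, Int.mul_ediv_cancel_left _ (by norm_num)]
    rw [hfd, hfd2, habs]
    have hb1 := PySem.Int.mod_neg_bounds i hneg
    have hb2l : 0 ≤ PySem.Int.mod i (-K) := PySem.Int.mod_nonneg i (by omega)
    have hb2r : PySem.Int.mod i (-K) < -K := PySem.Int.mod_lt i (by omega)
    have hd1 : K ∣ (i - PySem.Int.mod i K) := by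
      have h := PySem.Int.floordiv_mul_add_mod i K
      exact ⟨PySem.Int.floordiv i K, by rw [Int.mul_comm]; omega⟩
    have hd2 : (-K) ∣ (i - PySem.Int.mod i (-K)) := by
      have h := PySem.Int.floordiv_mul_add_mod i (-K)
      exact ⟨PySem.Int.floordiv i (-K), by rw [Int.mul_comm]; omega⟩
    have hdd : (-K) ∣ (PySem.Int.mod i (-K) - PySem.Int.mod i K) := by
      have h3 : (-K) ∣ (i - PySem.Int.mod i K) := (Int.neg_dvd).mpr hd1
      have h4 := dvd_sub h3 hd2
      have h5 : (i - PySem.Int.mod i K) - (i - PySem.Int.mod i (-K)) = PySem.Int.mod i (-K) - PySem.Int.mod i K := by ring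
      rw [h5] at h4
      exact h4
    have hcases := pv_dvd_cases (-K) (PySem.Int.mod i (-K) - PySem.Int.mod i K)
      (by omega) hdd (by omega) (by omega)
    omega
  · exact absurd hz hK
  · rw [abs_of_pos hpos]

-- Python i % K == 0 is the same test as i % |K| == 0
lemma pv_mod0_abs (K i : Int) :
    (PySem.Int.mod i K = 0) ↔ (PySem.Int.mod i |K| = 0) := by
  rw [PySem.Int.mod_eq_zero_iff_dvd, PySem.Int.mod_eq_zero_iff_dvd, abs_dvd]

-- quotient by m grows by one exactly when m divides the incremented dividend
lemma pv_step_div (m n : Int) (hm : 0 < m) :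
    (n + 1) / m = n / m + (if m ∣ (n + 1) then 1 else 0) := by
  have h1 : m * (n / m) + n % m = n := Int.ediv_add_emod n m
  have hr0 : 0 ≤ n % m := Int.emod_nonneg n (ne_of_gt hm)
  have hrm : n % m < m := Int.emod_lt_of_pos n hm
  by_cases hd : m ∣ (n + 1)
  · have hdr : m ∣ (n % m + 1) := by
      have h' : n % m + 1 = (n + 1) - m * (n / m) := by omega
      rw [h']; exact dvd_sub hd (Dvd.intro _ rfl)
    have hle : m ≤ n % m + 1 := Int.le_of_dvd (by omega) hdr
    have he : n + 1 = m * (n / m + 1) := by rw [mul_add, mul_one]; omega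
    rw [if_pos hd, he, Int.mul_ediv_cancel_left _ (ne_of_gt hm)]
  · rw [if_neg hd]
    have hlt : n % m + 1 < m := by
      rcases eq_or_lt_of_le (show n % m + 1 ≤ m by omega) with he | hlt
      · exfalso
        apply hd
        have hx : n + 1 = m * (n / m + 1) := by rw [mul_add, mul_one]; omega
        exact hx ▸ Dvd.intro _ rfl
      · exact hlt
    have he : n + 1 = (n % m + 1) + m * (n / m) := by omega
    rw [he, Int.add_mul_ediv_left _ _ (ne_of_gt hm)]
    rw [Int.ediv_eq_zero_of_lt (by omega) hlt]
    omega

lemma pv_c1step (m n : Int) (hm : 0 < m) (hdvd : PySem.Int.mod (n + 1) m = 0) :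
    PySem.Int.floordiv (n + 1) m = PySem.Int.floordiv n m + 1 := by
  have hd : m ∣ (n + 1) := (PySem.Int.mod_eq_zero_iff_dvd _ _).mp hdvd
  rw [PySem.Int.floordiv_eq_ediv_of_pos hm, PySem.Int.floordiv_eq_ediv_of_pos hm,
    pv_step_div m n hm, if_pos hd]

lemma pv_c1step' (m n : Int) (hm : 0 < m) (hnd : ¬ PySem.Int.mod (n + 1) m = 0) :
    PySem.Int.floordiv (n + 1) m = PySem.Int.floordiv n m := by
  have hd : ¬ m ∣ (n + 1) := fun hd => hnd ((PySem.Int.mod_eq_zero_iff_dvd _ _).mpr hd)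
  rw [PySem.Int.floordiv_eq_ediv_of_pos hm, PySem.Int.floordiv_eq_ediv_of_pos hm,
    pv_step_div m n hm, if_neg hd]
  omega

-- residue characterisation: a % m = r ↔ m ∣ a - r (0 ≤ r < m)
lemma pv_mod_eq_iff_dvd (a m r : Int) (hm : 0 < m) (hr0 : 0 ≤ r) (hrm : r < m) :
    PySem.Int.mod a m = r ↔ m ∣ (a - r) := by
  rw [PySem.Int.mod_eq_emod_of_pos hm]
  have hr : r % m = r := Int.emod_eq_of_lt hr0 hrm
  rw [Int.dvd_iff_emod_eq_zero, ← Int.emod_eq_emod_iff_emod_sub_eq_zero, hr]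

-- step of B's closed-form count of i ≤ n with i % m = h
lemma pv_c2step (m h n : Int) (hm : 0 < m) (hh0 : 0 < h) (hhm : h < m) (hn : 0 ≤ n) :
    (if n + 1 ≥ h then PySem.Int.floordiv (n + 1 - h) m + 1 else 0)
  = (if n ≥ h then PySem.Int.floordiv (n - h) m + 1 else 0)
    + (if PySem.Int.mod (n + 1) m = h then 1 else 0) := by
  simp only [pv_mod_eq_iff_dvd (n + 1) m h hm hh0.le hhm]
  by_cases hge' : n ≥ h
  · rw [if_pos (show n + 1 ≥ h by omega), if_pos hge',
      PySem.Int.floordiv_eq_ediv_of_pos hm, PySem.Int.floordiv_eq_ediv_of_pos hm,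
      show n + 1 - h = (n - h) + 1 by ring, pv_step_div m (n - h) hm,
      show n - h + 1 = n + 1 - h by ring]
    split_ifs <;> omega
  · by_cases hge : n + 1 ≥ h
    · rw [if_pos hge, if_neg hge', show n + 1 - h = 0 by omega,
        if_pos (dvd_zero m), PySem.Int.floordiv_eq_ediv_of_pos hm, Int.zero_ediv]
    · rw [if_neg hge, if_neg hge']
      have hnd : ¬ m ∣ (n + 1 - h) := by
        intro hd
        rcases pv_dvd_cases m (n + 1 - h + m) hm (dvd_add hd (dvd_refl m))
          (by omega) (by omega) with h0 | h0 <;> omega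
      rw [if_neg hnd]
      omega

-- A's odd-K loop equals B's closed form
lemma pv_count1 (K : Int) (hK : K ≠ 0) (n : Nat) :
    (PySem.List.pyRange 1 ((n : Int) + 1) 1).foldl
      (fun c i => if PySem.Int.mod i K = 0 then c + 1 else c) 0
    = PySem.Int.floordiv (n : Int) |K| := by
  have hm : 0 < |K| := abs_pos.mpr hK
  induction n with
  | zero =>
    rw [show ((0 : Nat) : Int) + 1 = 1 by norm_num, PySem.List.pyRange_one_eq_nil (le_refl 1)]
    simp [PySem.Int.floordiv_eq_ediv_of_pos hm]
  | succ n ih =>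
    rw [show ((n + 1 : Nat) : Int) = (n : Int) + 1 by push_cast; ring,
      PySem.List.pyRange_one_succ_right (by omega), List.foldl_append]
    simp only [List.foldl_cons, List.foldl_nil]
    rw [ih]
    by_cases hz : PySem.Int.mod ((n : Int) + 1) K = 0
    · rw [if_pos hz, pv_c1step |K| (n : Int) hm ((pv_mod0_abs K _).mp hz)]
    · rw [if_neg hz, pv_c1step' |K| (n : Int) hm (fun hx => hz ((pv_mod0_abs K _).mpr hx))]

-- A's even-K loop equals B's pair of closed forms
lemma pv_count2 (K : Int) (hK : K ≠ 0) (h2 : 2 ∣ K) (n : Nat) :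
    (PySem.List.pyRange 1 ((n : Int) + 1) 1).foldl
      (fun (s : Int × Int) i =>
        let s := if PySem.Int.mod i K = PySem.Int.floordiv K 2 then (s.1, s.2 + 1) else s
        if PySem.Int.mod i K = 0 then (s.1 + 1, s.2) else s) ((0 : Int), (0 : Int))
    = (PySem.Int.floordiv (n : Int) |K|,
       if (n : Int) ≥ PySem.Int.floordiv |K| 2 then
         PySem.Int.floordiv ((n : Int) - PySem.Int.floordiv |K| 2) |K| + 1 else 0) := by
  have hm : 0 < |K| := abs_pos.mpr hK
  have hh0 : 0 < PySem.Int.floordiv |K| 2 := by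
    obtain ⟨t, ht⟩ := h2
    have hft : PySem.Int.floordiv |K| 2 = |t| := by
      rw [PySem.Int.floordiv_eq_ediv_of_pos (by norm_num), ht, abs_mul,
        show |(2 : Int)| = 2 by norm_num, Int.mul_ediv_cancel_left _ (by norm_num)]
    rw [hft]
    have : t ≠ 0 := by rintro rfl; simp at ht; exact hK (by omega)
    exact abs_pos.mpr this
  have hhm : PySem.Int.floordiv |K| 2 < |K| := by
    rw [PySem.Int.floordiv_eq_ediv_of_pos (by norm_num)]
    omega
  induction n with
  | zero =>
    rw [show ((0 : Nat) : Int) + 1 = 1 by norm_num, PySem.List.pyRange_one_eq_nil (le_refl 1)]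
    simp only [List.foldl_nil]
    rw [if_neg (by omega), PySem.Int.floordiv_eq_ediv_of_pos hm]
    norm_num
  | succ n ih =>
    rw [show ((n + 1 : Nat) : Int) = (n : Int) + 1 by push_cast; ring,
      PySem.List.pyRange_one_succ_right (by omega), List.foldl_append]
    rw [ih]
    simp only [List.foldl_cons, List.foldl_nil]
    have hiffh := pv_half K ((n : Int) + 1) hK h2
    have hc2 := pv_c2step |K| (PySem.Int.floordiv |K| 2) (n : Int) hm hh0 hhm
      (Int.natCast_nonneg n)
    by_cases hch : PySem.Int.mod ((n : Int) + 1) |K| = PySem.Int.floordiv |K| 2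
    · have hq : PySem.Int.mod ((n : Int) + 1) K = PySem.Int.floordiv K 2 := hiffh.mpr hch
      have hz : ¬ PySem.Int.mod ((n : Int) + 1) K = 0 := by
        intro h0
        rw [pv_mod0_abs K _] at h0
        omega
      rw [if_pos hq, if_neg hz]
      simp only [Prod.mk.injEq]
      constructor
      · exact (pv_c1step' |K| (n : Int) hm (by rw [← pv_mod0_abs K _]; exact hz)).symm
      · rw [hc2, if_pos hch]
    · by_cases hc0 : PySem.Int.mod ((n : Int) + 1) |K| = 0
      · have hz : PySem.Int.mod ((n : Int) + 1) K = 0 := (pv_mod0_abs K _).mpr hc0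
        have hq : ¬ PySem.Int.mod ((n : Int) + 1) K = PySem.Int.floordiv K 2 :=
          fun hx => hch (hiffh.mp hx)
        rw [if_neg hq, if_pos hz]
        simp only [Prod.mk.injEq]
        constructor
        · exact (pv_c1step |K| (n : Int) hm hc0).symm
        · rw [hc2, if_neg hch]; omega
      · have hz : ¬ PySem.Int.mod ((n : Int) + 1) K = 0 :=
          fun hx => hc0 ((pv_mod0_abs K _).mp hx)
        have hq : ¬ PySem.Int.mod ((n : Int) + 1) K = PySem.Int.floordiv K 2 :=
          fun hx => hch (hiffh.mp hx)
        rw [if_neg hq, if_neg hz]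
        simp only [Prod.mk.injEq]
        constructor
        · exact (pv_c1step' |K| (n : Int) hm hc0).symm
        · rw [hc2, if_neg hch]; omega

lemma pv_even (K : Int) (hodd : ¬ PySem.Int.mod K 2 = 1) : 2 ∣ K := by
  have h0 : 0 ≤ PySem.Int.mod K 2 := PySem.Int.mod_nonneg K (by norm_num)
  have h1 : PySem.Int.mod K 2 < 2 := PySem.Int.mod_lt K (by norm_num)
  have : PySem.Int.mod K 2 = 0 := by omega
  exact (PySem.Int.mod_eq_zero_iff_dvd _ _).mp this

-- ===== VERDICT (by name: the statement is the Claim_ definition above) =====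
theorem count_valid_triples_spec : Claim_equal_count_valid_triples := by
  intro N K hDom hPre
  unfold Pre_count_valid_triples at hPre
  unfold Spec_count_valid_triples count_valid_triples count_valid_triples_alt
  by_cases hK : K = 0
  · subst hK
    have hN : N < 1 := by omega
    rw [PySem.List.pyRange_one_eq_nil (by omega)]
    simp
  · by_cases hN : N < 1
    · rw [PySem.List.pyRange_one_eq_nil (by omega), if_pos (Or.inr hN)]
      by_cases hodd : PySem.Int.mod K 2 = 1
      · rw [if_pos hodd]; norm_num
      · rw [if_neg hodd]; norm_num
    · have hBneg : ¬ (K = 0 ∨ N < 1) := by omega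
      rw [if_neg hBneg]
      obtain ⟨n, hn⟩ : ∃ n : Nat, N = (n : Int) := ⟨N.toNat, (Int.toNat_of_nonneg (by omega)).symm⟩
      subst hn
      by_cases hodd : PySem.Int.mod K 2 = 1
      · rw [if_pos hodd, if_pos hodd, pv_count1 K hK n]
      · rw [if_neg hodd, if_neg hodd, pv_count2 K hK (pv_even K hodd) n]

theorem count_valid_triples_raises : Claim_raises_count_valid_triples := by
  unfold Claim_raises_count_valid_triples
  refine ⟨?_, by decide⟩
  intro N K _ h hp
  exact hp ⟨h.1, h.2⟩

-- self-check: the raises witness indeed falls outside Pre_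
lemma pv_raise_witness_outside_pre_ok :
    ¬ Pre_count_valid_triples pvRaiseWitness_count_valid_triples.1 pvRaiseWitness_count_valid_triples.2 :=
  count_valid_triples_raises.1 pvRaiseWitness_count_valid_triples.1 pvRaiseWitness_count_valid_triples.2
    (by decide) (by decide)
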